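-- pv_equiv track=rewrite | github.com/Okkar25/Python_Course | Day17/week4.py | words_with_no_vowels
-- ===== SOURCE A (Python) =====
-- def words_with_no_vowels(str):
--     no_vowel_words = []
--
--     str_list = str.split(" ")
--
--     for word in str_list:
--         has_vowel = False
--
--         for char in word:
--             if char in "aeiouAEIOU":
--                 has_vowel = True
--                 break
--
--         if not has_vowel:
--             no_vowel_words.append(word)
--
--     return no_vowel_words
-- ===== SOURCE B (Python) =====
-- def words_with_no_vowels(str):
--     # Single left-to-right character scan (no split): build the current word and
--     # its vowel flag as we go; a space ends a word, end-of-string ends the last.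
--     result = []
--     cur = []
--     has_vowel = False
--     for ch in str:
--         if ch == " ":
--             if not has_vowel:
--                 result.append("".join(cur))
--             cur = []
--             has_vowel = False
--         else:
--             cur.append(ch)
--             if ch in "aeiouAEIOU":
--                 has_vowel = True
--     if not has_vowel:
--         result.append("".join(cur))
--     return result
-- ===== Notes on version B (the rewrite author's own statement) =====
-- stated objective: alternative
-- what changed: Replaces A's two-stage split-then-filter (per-word char scan with flag and break) by a single left-to-right character automaton that never calls split: it accumulates the current word and its vowel flag, emitting the word at each space and at end of string.
import Mathlib
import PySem

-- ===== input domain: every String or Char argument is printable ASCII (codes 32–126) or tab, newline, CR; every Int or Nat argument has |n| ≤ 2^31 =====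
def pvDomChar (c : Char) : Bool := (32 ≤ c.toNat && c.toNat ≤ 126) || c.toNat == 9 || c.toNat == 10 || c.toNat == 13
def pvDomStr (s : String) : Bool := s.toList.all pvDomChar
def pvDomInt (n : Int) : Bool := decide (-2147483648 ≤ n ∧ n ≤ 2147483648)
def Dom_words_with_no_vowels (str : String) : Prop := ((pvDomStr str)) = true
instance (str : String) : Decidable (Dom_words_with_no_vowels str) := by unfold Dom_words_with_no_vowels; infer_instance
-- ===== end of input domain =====

-- B replaces A's split-then-filter (with a per-word flag-and-break scan) by a single
-- left-to-right character automaton that never calls split (alternative; same cost).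

-- ===== PORT A =====
-- inner 'for char in word: if char in "aeiouAEIOU": has_vowel = True; break'
def pvHasVowel : List Char → Bool
  | [] => false
  | c :: rest => if ("aeiouAEIOU".toList.contains c) then true else pvHasVowel rest

def words_with_no_vowels (str : String) : List String :=
  ((PySem.Str.split? str " ").getD []).foldl   -- sep " " is nonempty, so split? is always `some`
    (fun acc w => if !pvHasVowel w.toList then acc ++ [w] else acc) []

-- ===== PORT B =====
-- one step of B's loop body: state = (result, current word chars, has_vowel flag)
def pvStep (st : List String × List Char × Bool) (ch : Char) : List String × List Char × Bool :=
  if ch = ' ' then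
    ((if !st.2.2 then st.1 ++ [String.ofList st.2.1] else st.1), ([], false))
  else
    (st.1, (st.2.1 ++ [ch], st.2.2 || ("aeiouAEIOU".toList.contains ch)))

-- B's trailing 'if not has_vowel: result.append("".join(cur))'
def pvFinish (st : List String × List Char × Bool) : List String :=
  if !st.2.2 then st.1 ++ [String.ofList st.2.1] else st.1

def words_with_no_vowels_alt (str : String) : List String :=
  pvFinish (str.toList.foldl pvStep ([], ([], false)))

-- ===== PRECONDITION & SPEC =====
def Spec_words_with_no_vowels (str : String) (out : List String) : Prop := out = words_with_no_vowels_alt str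
instance (str : String) (out : List String) : Decidable (Spec_words_with_no_vowels str out) := by unfold Spec_words_with_no_vowels; infer_instance

-- ===== CLAIM (what is proved, stated in full; the proofs are below) =====
def Claim_equal_words_with_no_vowels : Prop := ∀ (str : String), Dom_words_with_no_vowels str → Spec_words_with_no_vowels str (words_with_no_vowels str)

-- ===== LEMMAS AND PROOFS =====
-- 'word has a vowel' as a library predicate
def pvHV (w : List Char) : Bool := w.any (fun c => "aeiouAEIOU".toList.contains c)

-- the common value both programs compute, over the list of words
def pvG (parts : List (List Char)) : List String :=
  (parts.filter (fun w => !pvHV w)).map String.ofList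

theorem pvHV_nil : pvHV [] = false := rfl

theorem pvHV_cons (c : Char) (rest : List Char) :
    pvHV (c :: rest) = (("aeiouAEIOU".toList.contains c) || pvHV rest) := by
  simp only [pvHV, List.any_cons]

theorem pvG_cons (h : List Char) (t : List (List Char)) :
    pvG (h :: t) = (if !pvHV h then [String.ofList h] else []) ++ pvG t := by
  unfold pvG
  rw [List.filter_cons]
  by_cases hb : pvHV h <;> simp [hb]

theorem pvHasVowel_eq_hv (cs : List Char) : pvHasVowel cs = pvHV cs := by
  induction cs with
  | nil => rfl
  | cons c rest ih =>
      rw [pvHV_cons, show pvHasVowel (c :: rest)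
        = if ("aeiouAEIOU".toList.contains c) then true else pvHasVowel rest from rfl]
      cases h : ("aeiouAEIOU".toList.contains c) <;> simp [ih]

theorem modifyHead_triv (l : List (List Char)) : l.modifyHead (fun w => w) = l := by
  cases l <;> simp [List.modifyHead]

theorem splitOn_go_single (c : Char) (fuel : Nat) :
    ∀ (l cur : List Char) (acc : List (List Char)), l.length ≤ fuel →
      PySem.Chars.splitOn.go [c] fuel l cur acc
        = acc.reverse ++ (l.splitOn c).modifyHead (fun w => cur.reverse ++ w) := by
  induction fuel with
  | zero =>
      intro l cur acc h
      have : l = [] := List.eq_nil_of_length_eq_zero (Nat.le_zero.1 h)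
      subst this
      simp [PySem.Chars.splitOn.go, List.splitOn]
  | succ fuel ih =>
      intro l cur acc h
      cases l with
      | nil => simp [PySem.Chars.splitOn.go, List.splitOn]
      | cons c' rest =>
          by_cases hc : c = c'
          · subst hc
            have hpre : [c].isPrefixOf (c :: rest) = true := by simp [List.isPrefixOf]
            rw [show PySem.Chars.splitOn.go [c] (fuel+1) (c :: rest) cur acc
                  = PySem.Chars.splitOn.go [c] fuel rest [] (cur.reverse :: acc) by
                simp [PySem.Chars.splitOn.go, hpre]]
            rw [ih rest [] (cur.reverse :: acc) (by simpa using Nat.le_of_succ_le_succ h)]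
            simp [List.splitOn, List.splitOnP_cons, modifyHead_triv]
          · have hpre : [c].isPrefixOf (c' :: rest) = false := by
              simp [List.isPrefixOf, hc]
            rw [show PySem.Chars.splitOn.go [c] (fuel+1) (c' :: rest) cur acc
                  = PySem.Chars.splitOn.go [c] fuel rest (c' :: cur) acc by
                simp [PySem.Chars.splitOn.go, hpre]]
            rw [ih rest (c' :: cur) acc (by simpa using Nat.le_of_succ_le_succ h)]
            have hne := List.splitOnP_ne_nil (fun x => x == c) rest
            cases hsp : List.splitOnP (fun x => x == c) rest with
            | nil => exact absurd hsp hne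
            | cons h0 t0 =>
                simp [List.splitOn, List.splitOnP_cons, Ne.symm hc, hsp, List.modifyHead]

theorem splitOn_single (cs : List Char) (c : Char) :
    PySem.Chars.splitOn cs [c] = cs.splitOn c := by
  rw [PySem.Chars.splitOn, splitOn_go_single c (cs.length + 1) cs [] [] (Nat.le_succ _)]
  simp [modifyHead_triv]

theorem pvFoldl_split (cs : List Char) :
    ∀ (res : List String) (cur : List Char) (b : Bool) (h : List Char)
      (t : List (List Char)), cs.splitOn ' ' = h :: t →
      pvFinish (cs.foldl pvStep (res, (cur, b)))
        = res ++ (if !(b || pvHV h) then [String.ofList (cur ++ h)] else []) ++ pvG t := by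
  induction cs with
  | nil =>
      intro res cur b h t hsp
      have : ([] : List Char).splitOn ' ' = [[]] := by simp [List.splitOn]
      rw [this] at hsp
      cases hsp
      cases b <;> simp [pvFinish, pvHV_nil, pvG]
  | cons ch cs ih =>
      intro res cur b h t hsp
      have hne := List.splitOnP_ne_nil (fun x => x == ' ') cs
      by_cases hch : ch = ' '
      · subst hch
        have hsp' : (' ' :: cs).splitOn ' ' = [] :: cs.splitOn ' ' := by
          simp [List.splitOn, List.splitOnP_cons]
        rw [hsp'] at hsp
        cases hcs : cs.splitOn ' ' with
        | nil => exact absurd (by simpa [List.splitOn] using hcs) hne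
        | cons h' t' =>
            rw [hcs] at hsp
            cases hsp
            have step : pvStep (res, (cur, b)) ' '
                = ((if !b then res ++ [String.ofList cur] else res), ([], false)) := by
              simp [pvStep]
            rw [List.foldl_cons, step, ih _ [] false h' t' hcs, pvG_cons]
            cases b <;> simp [pvHV_nil, List.append_assoc]
      · cases hcs : cs.splitOn ' ' with
        | nil => exact absurd (by simpa [List.splitOn] using hcs) hne
        | cons h0 t0 =>
            have hsp0 : List.splitOnP (fun x => x == ' ') cs = h0 :: t0 := by
              simpa [List.splitOn] using hcs
            have hsp' : (ch :: cs).splitOn ' ' = (ch :: h0) :: t0 := by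
              simp [List.splitOn, List.splitOnP_cons, hch, hsp0, List.modifyHead]
            rw [hsp'] at hsp
            cases hsp
            have step : pvStep (res, (cur, b)) ch
                = (res, (cur ++ [ch], b || ("aeiouAEIOU".toList.contains ch))) := by
              simp [pvStep, hch]
            rw [List.foldl_cons, step,
              ih _ (cur ++ [ch]) (b || ("aeiouAEIOU".toList.contains ch)) _ _ hcs,
              pvHV_cons, Bool.or_assoc]
            simp [List.append_assoc]

theorem alt_eq_pvG (s : String) :
    words_with_no_vowels_alt s = pvG (s.toList.splitOn ' ') := by
  have hne := List.splitOnP_ne_nil (fun x => x == ' ') s.toList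
  cases hcs : s.toList.splitOn ' ' with
  | nil => exact absurd (by simpa [List.splitOn] using hcs) hne
  | cons h t =>
      unfold words_with_no_vowels_alt
      rw [pvFoldl_split s.toList [] [] false h t hcs, pvG_cons]
      simp

theorem a_eq_pvG (s : String) :
    words_with_no_vowels s = pvG (s.toList.splitOn ' ') := by
  unfold words_with_no_vowels
  have hsplit : (PySem.Str.split? s " ").getD []
      = (s.toList.splitOn ' ').map String.ofList := by
    simp [PySem.Str.split?, PySem.Chars.split?, splitOn_single,
      show (" " : String).toList = [' '] from rfl]
  rw [hsplit, PySem.List.foldl_append_if_eq_filter]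
  simp only [List.nil_append]
  rw [List.filter_map]
  unfold pvG
  congr 1
  refine List.filter_congr (fun w _ => ?_)
  simp [Function.comp, pvHasVowel_eq_hv]

-- ===== VERDICT (by name: the statement is the Claim_ definition above) =====
theorem words_with_no_vowels_spec : Claim_equal_words_with_no_vowels := by
  intro s _
  unfold Spec_words_with_no_vowels
  rw [a_eq_pvG, alt_eq_pvG]
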